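-- pv_equiv track=rewrite | github.com/cakimpei/wunsen | src/wunsen/mandarin/zh_sandhi.py | alter_inner_third
-- ===== SOURCE A (Python) =====
-- from typing import Any, Dict, List, Tuple
--
-- def alter_inner_third(
--         word_group: List[int],
--         third: bool) -> Tuple[List[int], bool]:
--     new_syl = []
--     for syl in word_group:
--         tone = syl
--         if syl == 3:
--             if third == True:
--                 tone = 2
--             third = True
--         else:
--             third = False
--         new_syl.append(tone)
--     return new_syl, third
-- ===== SOURCE B (Python) =====
-- def alter_inner_third(word_group, third):
--     prev = [third] + [s == 3 for s in word_group[:-1]]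
--     new_syl = [2 if s == 3 and p else s for s, p in zip(word_group, prev)]
--     new_third = (word_group[-1] == 3) if word_group else third
--     return new_syl, new_third
-- ===== Notes on version B (the rewrite author's own statement) =====
-- stated objective: alternative
-- what changed: Replaces the stateful loop that threads a mutable 'third' flag with a data-flow formulation: a shifted predecessor-flag list zipped with the input in a comprehension, and the returned flag computed independently from the last element.
import Mathlib
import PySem

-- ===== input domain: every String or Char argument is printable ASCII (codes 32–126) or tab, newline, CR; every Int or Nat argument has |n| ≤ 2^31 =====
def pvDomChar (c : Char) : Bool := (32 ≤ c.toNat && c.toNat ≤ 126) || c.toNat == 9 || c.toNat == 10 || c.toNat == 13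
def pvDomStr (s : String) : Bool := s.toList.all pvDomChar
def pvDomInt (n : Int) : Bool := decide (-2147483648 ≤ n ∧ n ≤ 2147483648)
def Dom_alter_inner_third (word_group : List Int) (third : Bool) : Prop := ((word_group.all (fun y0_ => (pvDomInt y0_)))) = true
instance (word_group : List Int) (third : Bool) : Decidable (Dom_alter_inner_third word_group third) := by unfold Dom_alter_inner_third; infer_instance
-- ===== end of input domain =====

-- B replaces A's stateful loop with a zipped predecessor-flag comprehension plus an
-- independent last-element flag (alternative decomposition, same cost).


-- ===== PORT A =====
-- the loop body: tone = syl; if syl == 3: (tone = 2 if third) and third = True else third = False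
def alter_inner_third_step (acc : List Int × Bool) (syl : Int) : List Int × Bool :=
  if syl = 3 then
    (acc.1 ++ [if acc.2 = true then 2 else syl], true)
  else
    (acc.1 ++ [syl], false)

def alter_inner_third (word_group : List Int) (third : Bool) : List Int × Bool :=
  word_group.foldl alter_inner_third_step ([], third)

-- ===== PORT B =====
def alter_inner_third_alt (word_group : List Int) (third : Bool) : List Int × Bool :=
  let prev : List Bool := third :: word_group.dropLast.map (fun s => s == 3)
  let new_syl : List Int :=
    (word_group.zip prev).map (fun sp => if sp.1 == 3 && sp.2 then 2 else sp.1)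
  let new_third : Bool :=
    match word_group.getLast? with
    | some x => x == 3
    | none => third
  (new_syl, new_third)

-- ===== PRECONDITION & SPEC =====
def Spec_alter_inner_third (word_group : List Int) (third : Bool) (out : List Int × Bool) : Prop := out = alter_inner_third_alt word_group third
instance (word_group : List Int) (third : Bool) (out : List Int × Bool) : Decidable (Spec_alter_inner_third word_group third out) := by unfold Spec_alter_inner_third; infer_instance

-- ===== CLAIM (what is proved, stated in full; the proofs are below) =====
def Claim_equal_alter_inner_third : Prop := ∀ (word_group : List Int) (third : Bool), Dom_alter_inner_third word_group third → Spec_alter_inner_third word_group third (alter_inner_third word_group third)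

-- ===== LEMMAS AND PROOFS =====

-- B's cons unfolding: on s :: t, B emits the sandhi-adjusted head and continues on t
-- with predecessor flag (s == 3).
theorem alt_cons (s : Int) (t : List Int) (third : Bool) :
    alter_inner_third_alt (s :: t) third =
      ((if s == 3 && third then 2 else s) :: (alter_inner_third_alt t (s == 3)).1,
       (alter_inner_third_alt t (s == 3)).2) := by
  cases t with
  | nil => simp [alter_inner_third_alt]
  | cons b u =>
    simp only [alter_inner_third_alt, List.dropLast]
    cases hl : (b :: u).getLast? with
    | none => simp at hl
    | some x => simp [hl]

-- loop invariant for A's fold: accumulated prefix is preserved, and the fold computes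
-- B's list appended to it together with B's flag.
theorem fold_eq (word_group : List Int) :
    ∀ (acc : List Int) (third : Bool),
      word_group.foldl alter_inner_third_step (acc, third) =
        (acc ++ (alter_inner_third_alt word_group third).1,
         (alter_inner_third_alt word_group third).2) := by
  induction word_group with
  | nil => intro acc third; simp [alter_inner_third_alt]
  | cons s t ih =>
    intro acc third
    rw [List.foldl_cons, alt_cons]
    by_cases hs : s = 3
    · subst hs
      cases third <;> simp [alter_inner_third_step, ih]
    · have hb : (s == 3) = false := by simp [hs]
      simp [alter_inner_third_step, hs, hb, ih]

-- ===== VERDICT (by name: the statement is the Claim_ definition above) =====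
theorem alter_inner_third_spec : Claim_equal_alter_inner_third := by
  intro word_group third _
  unfold Spec_alter_inner_third alter_inner_third
  rw [fold_eq]
  simp
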